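-- pv_equiv track=rewrite | github.com/a-sidorova/bioinformatics_course | 8_3.py | genome
-- ===== SOURCE A (Python) =====
-- def genome(patterns):
--     overlap_graph = dict.fromkeys(patterns)
--     for v in overlap_graph:
--         overlap_graph[v] = None
--         for read in patterns:
--             if read[:-1] == v[1:]:
--                 overlap_graph[v] = read
--     return overlap_graph
-- ===== SOURCE B (Python) =====
-- def genome(patterns):
--     index = {}
--     for read in patterns:
--         index[read[:-1]] = read
--     return {v: index.get(v[1:]) for v in dict.fromkeys(patterns)}
-- ===== Notes on version B (the rewrite author's own statement) =====
-- stated objective: faster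
-- what changed: Replaces the inner scan over all reads per vertex by a prefix->read dict built in one pass (last write wins), so each vertex's successor is a single hash lookup of its suffix.
import Mathlib
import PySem

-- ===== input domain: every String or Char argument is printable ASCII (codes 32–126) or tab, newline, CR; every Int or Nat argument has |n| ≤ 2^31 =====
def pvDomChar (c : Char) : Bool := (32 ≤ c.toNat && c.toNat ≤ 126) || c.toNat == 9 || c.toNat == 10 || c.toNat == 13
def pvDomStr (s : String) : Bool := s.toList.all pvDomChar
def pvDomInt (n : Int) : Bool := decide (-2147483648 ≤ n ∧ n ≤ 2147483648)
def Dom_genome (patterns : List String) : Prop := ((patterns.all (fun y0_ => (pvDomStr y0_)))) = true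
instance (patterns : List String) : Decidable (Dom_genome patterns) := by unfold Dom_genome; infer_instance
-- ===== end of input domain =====

-- B replaces A's inner scan over all reads per vertex by a prefix->read dict built once (last write wins),
-- looked up at each vertex's suffix: an asymptotically faster exact re-implementation.


-- ===== PORT A =====
-- overlap_graph = dict.fromkeys(patterns); for v in overlap_graph: set None, then scan all reads
def genome (patterns : List String) : List (String × Option String) :=
  let og0 : PySem.Dict String (Option String) :=
    patterns.foldl (fun d p => d.insert p none) PySem.Dict.empty
  (og0.keys.foldl (fun d v =>
      patterns.foldl (fun d read =>
        if PySem.Str.slice read none (some (-1)) == PySem.Str.slice v (some 1) none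
        then d.insert v (some read) else d)
        (d.insert v none)) og0).items

-- ===== PORT B =====
-- index[read[:-1]] = read (last write wins), then one lookup per distinct vertex
def genome_alt (patterns : List String) : List (String × Option String) :=
  let index : PySem.Dict String String :=
    patterns.foldl (fun d read => d.insert (PySem.Str.slice read none (some (-1))) read)
      PySem.Dict.empty
  (PySem.List.dedup patterns).map (fun v => (v, index.get? (PySem.Str.slice v (some 1) none)))

-- ===== PRECONDITION & SPEC =====
def Spec_genome (patterns : List String) (out : List (String × Option String)) : Prop := out = genome_alt patterns
instance (patterns : List String) (out : List (String × Option String)) : Decidable (Spec_genome patterns out) := by unfold Spec_genome; infer_instance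

-- ===== CLAIM (what is proved, stated in full; the proofs are below) =====
def Claim_equal_genome : Prop := ∀ (patterns : List String), Dom_genome patterns → Spec_genome patterns (genome patterns)

-- ===== LEMMAS AND PROOFS =====

-- the last read whose prefix equals v's suffix (value A stores at key v, value B looks up)
def lastOverlap (ps : List String) (v : String) : Option String :=
  ps.foldl (fun acc r =>
    if PySem.Str.slice r none (some (-1)) == PySem.Str.slice v (some 1) none
    then some r else acc) none

-- A's inner loop over `patterns`, started from d[v] = a, is a single overwrite at v
theorem inner_loop_eq (l : List String) (d : PySem.Dict String (Option String))
    (v : String) (a : Option String) :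
    l.foldl (fun d read =>
        if PySem.Str.slice read none (some (-1)) == PySem.Str.slice v (some 1) none
        then d.insert v (some read) else d) (d.insert v a)
    = d.insert v (l.foldl (fun acc r =>
        if PySem.Str.slice r none (some (-1)) == PySem.Str.slice v (some 1) none
        then some r else acc) a) := by
  induction l generalizing a with
  | nil => rfl
  | cons r l ih =>
    simp only [List.foldl_cons]
    by_cases h : (PySem.Str.slice r none (some (-1)) == PySem.Str.slice v (some 1) none) = true
    · rw [if_pos h, if_pos h, PySem.Dict.insert_insert_self]
      exact ih _
    · rw [if_neg h, if_neg h]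
      exact ih _

-- lookup through a loop of inserts with a value independent of the dict
theorem get?_foldl_insert_fun (ks : List String) (g : String → Option String)
    (d : PySem.Dict String (Option String)) (k : String) :
    (ks.foldl (fun d v => d.insert v (g v)) d).get? k
      = if k ∈ ks then some (g k) else d.get? k := by
  induction ks generalizing d with
  | nil => simp
  | cons x ks ih =>
    simp only [List.foldl_cons, ih, List.mem_cons]
    by_cases hk : k ∈ ks
    · simp [hk]
    · by_cases hx : k = x
      · simp [hx, PySem.Dict.get?_insert_self]
      · rw [PySem.Dict.get?_insert]
        simp [hk, hx]

-- B's index lookup at k is the last read whose prefix is k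
theorem get?_index (l : List String) (d0 : PySem.Dict String String) (k : String) :
    (l.foldl (fun d r => d.insert (PySem.Str.slice r none (some (-1))) r) d0).get? k
      = l.foldl (fun acc r =>
          if PySem.Str.slice r none (some (-1)) == k then some r else acc) (d0.get? k) := by
  induction l generalizing d0 with
  | nil => rfl
  | cons r l ih =>
    simp only [List.foldl_cons, ih]
    congr 1
    rw [PySem.Dict.get?_insert]
    by_cases h : PySem.Str.slice r none (some (-1)) = k
    · simp [h]
    · simp [h, Ne.symm h]

theorem og0_keys (patterns : List String) :
    (patterns.foldl (fun d p => d.insert p (none : Option String)) PySem.Dict.empty).keys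
      = PySem.List.dedup patterns := by
  rw [PySem.Dict.keys_foldl_insert]
  simp [PySem.Set.update_nil_left]

theorem genome_eq (patterns : List String) :
    genome patterns
      = (PySem.List.dedup patterns).map (fun v => (v, lastOverlap patterns v)) := by
  unfold genome
  have hstep : (fun (d : PySem.Dict String (Option String)) (v : String) =>
      patterns.foldl (fun d read =>
        if PySem.Str.slice read none (some (-1)) == PySem.Str.slice v (some 1) none
        then d.insert v (some read) else d) (d.insert v none))
      = fun d v => d.insert v (lastOverlap patterns v) := by
    funext d v
    exact inner_loop_eq patterns d v none
  rw [hstep]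
  set og0 : PySem.Dict String (Option String) :=
    patterns.foldl (fun d p => d.insert p none) PySem.Dict.empty with hog0
  have hnd0 : og0.keys.Nodup := by
    rw [hog0]
    exact PySem.Dict.nodup_keys_foldl_insert _ _ _ (by simp)
  set og := og0.keys.foldl (fun d v => d.insert v (lastOverlap patterns v)) og0 with hog
  have hkeys : og.keys = og0.keys := by
    rw [hog, PySem.Dict.keys_foldl_insert, PySem.Set.update_eq_append_filter,
      PySem.Set.ofList_eq_self_of_nodup og0.keys hnd0]
    have : (og0.keys.filter fun y => !(PySem.Set.contains og0.keys y)) = [] := by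
      apply List.filter_eq_nil_iff.mpr
      intro a ha
      simp [PySem.Set.contains_eq_listContains, ha]
    rw [this, List.append_nil]
  have hnd : og.keys.Nodup := hkeys ▸ hnd0
  rw [PySem.Dict.items_eq_map_keys og hnd none, hkeys, og0_keys]
  apply List.map_congr_left
  intro v hv
  have hget : og.get? v = some (lastOverlap patterns v) := by
    rw [hog, get?_foldl_insert_fun]
    have : v ∈ og0.keys := by rw [og0_keys]; exact hv
    simp [this]
  simp [PySem.Dict.getD_eq_get?_getD, hget]

theorem genome_alt_eq (patterns : List String) :
    genome_alt patterns
      = (PySem.List.dedup patterns).map (fun v => (v, lastOverlap patterns v)) := by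
  unfold genome_alt
  apply List.map_congr_left
  intro v _
  rw [get?_index]
  simp [PySem.Dict.get?_empty, lastOverlap]

-- ===== VERDICT (by name: the statement is the Claim_ definition above) =====
theorem genome_spec : Claim_equal_genome := by
  intro patterns _
  unfold Spec_genome
  rw [genome_eq, genome_alt_eq]
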